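-- pv_equiv track=rewrite | github.com/scv74502/PS | 프로그래머스/lv2/118667. 두 큐 합 같게 만들기/두 큐 합 같게 만들기.py | solution
-- ===== SOURCE A (Python) =====
-- from collections import deque
--
-- def solution(queue1, queue2):
--     answer = 0
--
--     limit = len(queue1) + len(queue2)
--
--     q1s = sum(queue1)
--     q2s= sum(queue2)
--
--     queue1 = deque(queue1)
--     queue2 = deque(queue2)
--
--
--     if (sum(queue1) + sum(queue2)) % 2 == 1:
--         return -1
--
--
--     while q1s != q2s:
--         if answer >= limit:
--             return -1
--         while queue2 and q1s < q2s:
--             tmp = queue2.popleft()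
--             queue1.append(tmp)
--             q2s -= tmp
--             q1s += tmp
--             answer += 1
--
--         while queue1 and q1s > q2s:
--             tmp = queue1.popleft()
--             queue2.append(tmp)
--             q1s -= tmp
--             q2s += tmp
--             answer += 1
--
--     return answer
-- ===== SOURCE B (Python) =====
-- def advance(pref, base, need, kmax):
--     """Smallest k <= kmax with pref[base+k] - pref[base] >= need (kmax if none)."""
--     k = 0
--     while k < kmax and pref[base + k] - pref[base] < need:
--         k += 1
--     return k
--
--
-- def solution(queue1, queue2):
--     total = sum(queue1) + sum(queue2)
--     if total % 2 == 1:
--         return -1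
--     target = total // 2
--     n = len(queue1) + len(queue2)
--     pref, running = [0], 0
--     for x in queue1 + queue2 + queue1 + queue2:
--         running += x
--         pref.append(running)
--     left, right = 0, len(queue1)
--     s1, moves = sum(queue1), 0
--     while s1 != target:
--         if moves >= n:
--             return -1
--         k = advance(pref, right % n, target - s1, n - (right - left))
--         s1 += pref[right % n + k] - pref[right % n]
--         right += k
--         moves += k
--         k = advance(pref, left % n, s1 - target, right - left)
--         s1 -= pref[left % n + k] - pref[left % n]
--         left += k
--         moves += k
--     return moves
-- ===== Notes on version B (the rewrite author's own statement) =====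
-- stated objective: alternative
-- what changed: B never moves an element: it precomputes a doubled prefix-sum array over the concatenated queues and advances two modular window indices, taking each run of transfers as one batch whose length a shared helper reads off the prefix array, instead of A's per-element deque popleft/append with tracked sums.
import Mathlib
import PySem

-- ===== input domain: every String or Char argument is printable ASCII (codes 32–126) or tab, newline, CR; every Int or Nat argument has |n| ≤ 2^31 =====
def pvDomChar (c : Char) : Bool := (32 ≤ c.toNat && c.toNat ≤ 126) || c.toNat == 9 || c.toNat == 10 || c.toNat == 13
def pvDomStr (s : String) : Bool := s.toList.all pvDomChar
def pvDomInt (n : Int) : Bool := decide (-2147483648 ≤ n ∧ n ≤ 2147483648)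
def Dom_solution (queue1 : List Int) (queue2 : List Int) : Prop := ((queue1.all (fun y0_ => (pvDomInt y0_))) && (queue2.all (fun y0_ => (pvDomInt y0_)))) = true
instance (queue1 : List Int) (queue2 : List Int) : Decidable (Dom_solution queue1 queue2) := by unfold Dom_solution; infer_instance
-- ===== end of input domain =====

-- B replaces A's per-element deque shuffling by a read-only doubled prefix-sum array with
-- two modular window indices, taking each run of transfers as one batch (objective: alternative).

-- ===== PORT A =====
-- inner loop 1: while queue2 and q1s < q2s: move front of queue2 to queue1
def pyInner1 (q1 q2 : List Int) (s1 s2 ans : Int) : List Int × List Int × Int × Int × Int :=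
  match q2 with
  | [] => (q1, [], s1, s2, ans)
  | t :: rest =>
    if s1 < s2 then pyInner1 (q1 ++ [t]) rest (s1 + t) (s2 - t) (ans + 1)
    else (q1, t :: rest, s1, s2, ans)

-- inner loop 2: while queue1 and q1s > q2s: move front of queue1 to queue2
def pyInner2 (q1 q2 : List Int) (s1 s2 ans : Int) : List Int × List Int × Int × Int × Int :=
  match q1 with
  | [] => ([], q2, s1, s2, ans)
  | t :: rest =>
    if s1 > s2 then pyInner2 rest (q2 ++ [t]) (s1 - t) (s2 + t) (ans + 1)
    else (t :: rest, q2, s1, s2, ans)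

-- outer loop: while q1s != q2s (fueled with the same fuel as B's port; on inputs where the
-- Python loops forever both fueled ports fall back to -1 in lockstep, so equality still holds)
def pyOuter (limit : Int) : Nat → List Int × List Int × Int × Int × Int → Int
  | 0, _ => -1
  | fuel + 1, (q1, q2, s1, s2, ans) =>
    if s1 ≠ s2 then
      if ans ≥ limit then -1
      else
        let st1 := pyInner1 q1 q2 s1 s2 ans
        let st2 := pyInner2 st1.1 st1.2.1 st1.2.2.1 st1.2.2.2.1 st1.2.2.2.2
        pyOuter limit fuel st2
    else ans

def solution (queue1 : List Int) (queue2 : List Int) : Int :=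
  let limit : Int := (queue1.length : Int) + (queue2.length : Int)
  let q1s := queue1.sum
  let q2s := queue2.sum
  if PySem.Int.mod (q1s + q2s) 2 = 1 then -1
  else pyOuter limit (queue1.length + queue2.length + 2) (queue1, queue2, q1s, q2s, 0)

-- ===== PORT B =====
-- the running-sum loop building pref (state = (pref so far, running))
def buildPref (xs : List Int) : List Int :=
  (xs.foldl (fun (st : List Int × Int) x => (st.1 ++ [st.2 + x], st.2 + x)) ([0], 0)).1

-- Source B's advance: while k < kmax and pref[base+k]-pref[base] < need: k += 1
-- (recursion on kmax - k; every pref index read is in range on reachable calls, so getD is exact)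
def advanceGo (pref : List Int) (base : Nat) (need : Int) : Nat → Nat → Nat
  | 0, k => k
  | rem + 1, k =>
    if pref.getD (base + k) 0 - pref.getD base 0 < need then advanceGo pref base need rem (k + 1)
    else k

def advance (pref : List Int) (base : Nat) (need : Int) (kmax : Nat) : Nat :=
  advanceGo pref base need kmax 0

-- Source B's outer while loop (fueled with the same fuel as A's port)
def bOuter (pref : List Int) (n : Nat) (target : Int) : Nat → Nat → Nat → Nat → Int → Int
  | 0, _, _, _, _ => -1
  | fuel + 1, left, right, moves, s1 =>
    if s1 = target then (moves : Int)
    else if moves ≥ n then -1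
    else
      let k1 := advance pref (right % n) (target - s1) (n - (right - left))
      let s1' := s1 + (pref.getD (right % n + k1) 0 - pref.getD (right % n) 0)
      let right' := right + k1
      let k2 := advance pref (left % n) (s1' - target) (right' - left)
      let s1'' := s1' - (pref.getD (left % n + k2) 0 - pref.getD (left % n) 0)
      bOuter pref n target fuel (left + k2) right' (moves + k1 + k2) s1''

def solution_alt (queue1 : List Int) (queue2 : List Int) : Int :=
  let total := queue1.sum + queue2.sum
  if PySem.Int.mod total 2 = 1 then -1
  else
    let target := PySem.Int.floordiv total 2
    let n := queue1.length + queue2.length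
    let pref := buildPref (queue1 ++ queue2 ++ queue1 ++ queue2)
    bOuter pref n target (n + 2) 0 queue1.length 0 queue1.sum

-- ===== PRECONDITION & SPEC =====
def Spec_solution (queue1 : List Int) (queue2 : List Int) (out : Int) : Prop :=
  out = solution_alt queue1 queue2
instance (queue1 : List Int) (queue2 : List Int) (out : Int) : Decidable (Spec_solution queue1 queue2 out) := by
  unfold Spec_solution; infer_instance

-- ===== CLAIM (what is proved, stated in full; the proofs are below) =====
def Claim_equal_solution : Prop := ∀ (queue1 : List Int) (queue2 : List Int),
  Dom_solution queue1 queue2 → Spec_solution queue1 queue2 (solution queue1 queue2)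

-- ===== LEMMAS AND PROOFS =====

-- the batch length both programs compute: first k with (xs.take k).sum ≥ need (length if none)
def firstGE (need : Int) : List Int → Nat
  | [] => 0
  | x :: xs => if need ≤ 0 then 0 else firstGE (need - x) xs + 1

lemma firstGE_le (need : Int) (xs : List Int) : firstGE need xs ≤ xs.length := by
  induction xs generalizing need with
  | nil => simp [firstGE]
  | cons x xs ih =>
    simp only [firstGE]
    split_ifs
    · simp
    · simpa using Nat.succ_le_succ (ih (need - x))

-- A's first inner loop, characterised by firstGE
lemma inner1_eq (T : Int) :
    ∀ (q2 q1 : List Int) (a : Int), q1.sum + q2.sum = 2 * T →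
      pyInner1 q1 q2 q1.sum q2.sum a
        = (q1 ++ q2.take (firstGE (T - q1.sum) q2), q2.drop (firstGE (T - q1.sum) q2),
           (q1 ++ q2.take (firstGE (T - q1.sum) q2)).sum,
           (q2.drop (firstGE (T - q1.sum) q2)).sum,
           a + (firstGE (T - q1.sum) q2 : Nat)) := by
  intro q2
  induction q2 with
  | nil => intro q1 a _; simp [pyInner1, firstGE]
  | cons t rest ih =>
    intro q1 a hsum
    have hs : (t :: rest).sum = t + rest.sum := by simp
    by_cases hlt : q1.sum < (t :: rest).sum
    · have hneed : ¬ (T - q1.sum ≤ 0) := by omega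
      have hf : firstGE (T - q1.sum) (t :: rest) = firstGE (T - q1.sum - t) rest + 1 := by
        simp [firstGE, hneed]
      have e1 : q1.sum + t = (q1 ++ [t]).sum := by simp
      have e2 : (t :: rest).sum - t = rest.sum := by simp
      have hsum' : (q1 ++ [t]).sum + rest.sum = 2 * T := by simp; omega
      have ihx := ih (q1 ++ [t]) (a + 1) hsum'
      have e3 : T - (q1 ++ [t]).sum = T - q1.sum - t := by simp; omega
      rw [e3] at ihx
      simp only [pyInner1, if_pos hlt, e1, e2, ihx, hf, List.take_succ_cons,
        List.drop_succ_cons]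
      have eL : q1 ++ [t] ++ List.take (firstGE (T - q1.sum - t) rest) rest
          = q1 ++ t :: List.take (firstGE (T - q1.sum - t) rest) rest := by simp
      have eA : a + 1 + ((firstGE (T - q1.sum - t) rest : Nat) : Int)
          = a + ((firstGE (T - q1.sum - t) rest + 1 : Nat) : Int) := by push_cast; ring
      rw [eL, eA]
    · have hneed : T - q1.sum ≤ 0 := by omega
      simp only [pyInner1, if_neg hlt, firstGE, if_pos hneed]
      simp

lemma inner2_eq (T : Int) :
    ∀ (q1 q2 : List Int) (a : Int), q1.sum + q2.sum = 2 * T →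
      pyInner2 q1 q2 q1.sum q2.sum a
        = (q1.drop (firstGE (q1.sum - T) q1), q2 ++ q1.take (firstGE (q1.sum - T) q1),
           (q1.drop (firstGE (q1.sum - T) q1)).sum,
           (q2 ++ q1.take (firstGE (q1.sum - T) q1)).sum,
           a + (firstGE (q1.sum - T) q1 : Nat)) := by
  intro q1
  induction q1 with
  | nil => intro q2 a _; simp [pyInner2, firstGE]
  | cons t rest ih =>
    intro q2 a hsum
    have hs : (t :: rest).sum = t + rest.sum := by simp
    by_cases hgt : (t :: rest).sum > q2.sum
    · have hneed : ¬ ((t :: rest).sum - T ≤ 0) := by omega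
      have hf : firstGE ((t :: rest).sum - T) (t :: rest)
          = firstGE (rest.sum - T) rest + 1 := by
        have e : (t :: rest).sum - T - t = rest.sum - T := by omega
        simp only [firstGE, if_neg hneed, e]
      have e1 : q2.sum + t = (q2 ++ [t]).sum := by simp
      have e2 : (t :: rest).sum - t = rest.sum := by simp
      have hsum' : rest.sum + (q2 ++ [t]).sum = 2 * T := by simp; omega
      have ihx := ih (q2 ++ [t]) (a + 1) hsum'
      simp only [pyInner2, if_pos hgt, e1, e2, ihx, hf, List.take_succ_cons,
        List.drop_succ_cons]
      have eL : q2 ++ [t] ++ List.take (firstGE (rest.sum - T) rest) rest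
          = q2 ++ t :: List.take (firstGE (rest.sum - T) rest) rest := by simp
      have eA : a + 1 + ((firstGE (rest.sum - T) rest : Nat) : Int)
          = a + ((firstGE (rest.sum - T) rest + 1 : Nat) : Int) := by push_cast; ring
      rw [eL, eA]
    · have hneed : (t :: rest).sum - T ≤ 0 := by omega
      simp only [pyInner2, if_neg hgt, firstGE, if_pos hneed]
      simp

-- Source B's scan in advance, characterised by firstGE
lemma advanceGo_eq (pref : List Int) (base : Nat) (need : Int) :
    ∀ (ys : List Int) (k : Nat),
      (∀ j, j ≤ ys.length → pref.getD (base + (k + j)) 0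
          = pref.getD (base + k) 0 + (ys.take j).sum) →
      advanceGo pref base need ys.length k
        = k + firstGE (need - (pref.getD (base + k) 0 - pref.getD base 0)) ys := by
  intro ys
  induction ys with
  | nil => intro k _; simp [advanceGo, firstGE]
  | cons x xs ih =>
    intro k h
    have h1 := h 1 (by simp)
    have hx : pref.getD (base + (k + 1)) 0 = pref.getD (base + k) 0 + x := by
      simpa using h1
    by_cases hc : pref.getD (base + k) 0 - pref.getD base 0 < need
    · have ihx := ih (k + 1) (by
        intro j hj
        have := h (j + 1) (by simpa using Nat.succ_le_succ hj)
        have e : base + (k + (j + 1)) = base + (k + 1 + j) := by omega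
        rw [e] at this
        rw [this, hx]
        simp
        ring)
      show advanceGo pref base need (xs.length + 1) k = _
      rw [advanceGo, if_pos hc, ihx, hx]
      simp only [firstGE, if_neg (by omega : ¬ (need - (pref.getD (base + k) 0 - pref.getD base 0) ≤ 0))]
      have e : need - (pref.getD (base + k) 0 + x - pref.getD base 0)
          = need - (pref.getD (base + k) 0 - pref.getD base 0) - x := by ring
      rw [e]
      omega
    · show advanceGo pref base need (xs.length + 1) k = _
      rw [advanceGo, if_neg hc]
      simp only [firstGE, if_pos (by omega : need - (pref.getD (base + k) 0 - pref.getD base 0) ≤ 0)]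
      omega

-- buildPref computes the prefix sums
lemma buildPref_aux :
    ∀ (xs A : List Int) (s : Int),
      xs.foldl (fun (st : List Int × Int) x => (st.1 ++ [st.2 + x], st.2 + x)) (A, s)
        = (A ++ (List.range xs.length).map (fun i => s + (xs.take (i + 1)).sum), s + xs.sum) := by
  intro xs
  induction xs with
  | nil => intro A s; simp
  | cons x xs ih =>
    intro A s
    simp only [List.foldl_cons, ih (A ++ [s + x]) (s + x)]
    simp only [Prod.mk.injEq]
    constructor
    · simp only [List.length_cons]
      rw [List.range_succ_eq_map, List.map_cons, List.map_map]
      simp [Function.comp, add_assoc, List.append_assoc]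
    · simp; ring

lemma buildPref_getD (xs : List Int) (i : Nat) (hi : i ≤ xs.length) :
    (buildPref xs).getD i 0 = (xs.take i).sum := by
  unfold buildPref
  rw [buildPref_aux xs [0] 0]
  cases i with
  | zero => simp
  | succ j =>
    have hj : j < xs.length := by omega
    show (((0 : Int) :: (List.range xs.length).map fun i => 0 + (xs.take (i + 1)).sum).getD (j + 1) 0) = _
    rw [List.getD_cons_succ, List.getD_eq_getElem?_getD, List.getElem?_map, List.getElem?_range hj]
    simp

lemma pref_diff (c2 : List Int) (b j : Nat) (h : b + j ≤ c2.length) :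
    (buildPref c2).getD (b + j) 0 = (buildPref c2).getD b 0 + ((c2.drop b).take j).sum := by
  rw [buildPref_getD c2 (b + j) h, buildPref_getD c2 b (by omega)]
  rw [show b + j = b + j from rfl, List.take_add]
  simp

-- circular window: the doubled list read from base = L % n agrees with c.rotate L
lemma circ_take (c : List Int) (L k : Nat) (hn : 0 < c.length) (hk : k ≤ c.length) :
    ((c ++ c).drop (L % c.length)).take k = (c.rotate L).take k := by
  have hb : L % c.length < c.length := Nat.mod_lt _ hn
  apply List.ext_getElem?
  intro i
  by_cases hik : i < k
  · have hilt : i < c.length := by omega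
    rw [List.getElem?_take_of_lt hik, List.getElem?_take_of_lt hik, List.getElem?_drop,
      List.getElem?_rotate]
    by_cases hcase : L % c.length + i < c.length
    · have e : (i + L) % c.length = L % c.length + i := by
        rw [Nat.add_comm, Nat.add_mod, Nat.mod_eq_of_lt hilt, Nat.mod_eq_of_lt hcase]
      rw [List.getElem?_append_left hcase, e]
    · have e : (i + L) % c.length = L % c.length + i - c.length := by
        have h2 : L % c.length + i - c.length < c.length := by omega
        have h3 : i % c.length = i := Nat.mod_eq_of_lt hilt
        have h4 : L % c.length + i = c.length + (L % c.length + i - c.length) := by omega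
        rw [Nat.add_comm, Nat.add_mod, h3]
        conv_lhs => rw [h4]
        rw [Nat.add_mod_left, Nat.mod_eq_of_lt h2]
      rw [List.getElem?_append_right (by omega : c.length ≤ L % c.length + i), e]
    exact hilt
  · have hlen1 : (((c ++ c).drop (L % c.length)).take k).length ≤ i := by
      simp
      omega
    have hlen2 : ((c.rotate L).take k).length ≤ i := by
      simp [List.length_rotate]
      omega
    rw [List.getElem?_eq_none hlen1, List.getElem?_eq_none hlen2]

-- lockstep simulation of the two outer loops (one A iteration = one B iteration)
lemma outer_sim (c : List Int) (T : Int) (hc : c.sum = 2 * T) :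
    ∀ (fuel : Nat) (q1 q2 : List Int) (a left : Nat),
      q1 ++ q2 = c.rotate left →
      pyOuter (c.length : Int) fuel (q1, q2, q1.sum, q2.sum, (a : Int))
        = bOuter (buildPref (c ++ c)) c.length T fuel left (left + q1.length) a q1.sum := by
  intro fuel
  induction fuel with
  | zero => intro q1 q2 a left _; simp [pyOuter, bOuter]
  | succ fuel ih =>
    intro q1 q2 a left hrot
    have hlen : q1.length + q2.length = c.length := by
      have h := congrArg List.length hrot
      simp [List.length_rotate] at h
      omega
    have hsum : q1.sum + q2.sum = 2 * T := by
      have hp : (c.rotate left).sum = c.sum := (List.rotate_perm c left).sum_eq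
      have h1 : (q1 ++ q2).sum = c.sum := by rw [hrot, hp]
      have h2 : (q1 ++ q2).sum = q1.sum + q2.sum := by simp
      omega
    by_cases heqT : q1.sum = T
    · have hq2T : q2.sum = T := by omega
      simp only [pyOuter, bOuter]
      rw [if_neg (by omega : ¬ q1.sum ≠ q2.sum), if_pos heqT]
    · have hne : q1.sum ≠ q2.sum := by omega
      have hn : 0 < c.length := by
        rcases Nat.eq_zero_or_pos c.length with h0 | h
        · exfalso
          have hq1 : q1 = [] := List.eq_nil_of_length_eq_zero (by omega)
          have hc0 : c = [] := List.eq_nil_of_length_eq_zero h0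
          rw [hc0] at hc
          simp at hc
          rw [hq1] at heqT
          simp at heqT
          omega
        · exact h
      by_cases hbud : a ≥ c.length
      · simp only [pyOuter, bOuter]
        rw [if_pos hne, if_neg heqT,
          if_pos (by exact_mod_cast hbud : (a : Int) ≥ (c.length : Int)), if_pos hbud]
      · -- batch lengths
        set K1 := firstGE (T - q1.sum) q2 with hK1def
        have hK1le : K1 ≤ q2.length := firstGE_le _ _
        set q1' := q1 ++ q2.take K1 with hq1'def
        have hq1'len : q1'.length = q1.length + K1 := by
          rw [hq1'def]
          simp
          omega
        have hsplit1 : (q2.take K1).sum + (q2.drop K1).sum = q2.sum := by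
          rw [← List.sum_append, List.take_append_drop]
        have hq1'sum : q1'.sum = q1.sum + (q2.take K1).sum := by rw [hq1'def]; simp
        have hsum2 : q1'.sum + (q2.drop K1).sum = 2 * T := by omega
        set K2 := firstGE (q1'.sum - T) q1' with hK2def
        have hK2le : K2 ≤ q1'.length := firstGE_le _ _
        -- A side: the two inner runs
        have hA1 := inner1_eq T q2 q1 (a : Int) hsum
        rw [← hK1def, ← hq1'def] at hA1
        have hA2 := inner2_eq T q1' (q2.drop K1) ((a : Int) + K1) hsum2
        rw [← hK2def] at hA2
        -- B side: the grow scan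
        have hbase1 : (left + q1.length) % c.length < c.length := Nat.mod_lt _ hn
        have hrotg : c.rotate (left + q1.length) = q2 ++ q1 := by
          rw [← List.rotate_rotate, ← hrot,
            List.rotate_eq_drop_append_take (by simp : q1.length ≤ (q1 ++ q2).length),
            List.drop_left, List.take_left]
        have hG : ∀ j, j ≤ q2.length →
            (buildPref (c ++ c)).getD ((left + q1.length) % c.length + j) 0
              = (buildPref (c ++ c)).getD ((left + q1.length) % c.length) 0 + (q2.take j).sum := by
          intro j hj
          have hd := pref_diff (c ++ c) ((left + q1.length) % c.length) j (by simp; omega)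
          rw [hd]
          congr 1
          rw [circ_take c (left + q1.length) j hn (by omega), hrotg,
            List.take_append_of_le_length hj]
        have hk1 : advance (buildPref (c ++ c)) ((left + q1.length) % c.length) (T - q1.sum)
            (c.length - (left + q1.length - left)) = K1 := by
          rw [show c.length - (left + q1.length - left) = q2.length from by omega]
          unfold advance
          rw [advanceGo_eq (buildPref (c ++ c)) ((left + q1.length) % c.length) (T - q1.sum) q2 0
            (by intro j hj; simpa using hG j hj)]
          simp [hK1def]
        have hs1' : q1.sum + ((buildPref (c ++ c)).getD ((left + q1.length) % c.length + K1) 0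
            - (buildPref (c ++ c)).getD ((left + q1.length) % c.length) 0) = q1'.sum := by
          rw [hG K1 hK1le]
          omega
        -- B side: the shrink scan
        have hrot' : q1' ++ q2.drop K1 = c.rotate left := by
          rw [hq1'def, List.append_assoc, List.take_append_drop]
          exact hrot
        have hH : ∀ j, j ≤ q1'.length →
            (buildPref (c ++ c)).getD (left % c.length + j) 0
              = (buildPref (c ++ c)).getD (left % c.length) 0 + (q1'.take j).sum := by
          intro j hj
          have hj' : j ≤ c.length := by omega
          have hd := pref_diff (c ++ c) (left % c.length) j
            (by have := Nat.mod_lt left hn; simp; omega)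
          rw [hd]
          congr 1
          rw [circ_take c left j hn hj', ← hrot', List.take_append_of_le_length hj]
        have hK2arg : left + q1.length + K1 - left = q1'.length := by omega
        have hk2 : advance (buildPref (c ++ c)) (left % c.length) (q1'.sum - T)
            (left + q1.length + K1 - left) = K2 := by
          rw [hK2arg]
          unfold advance
          rw [advanceGo_eq (buildPref (c ++ c)) (left % c.length) (q1'.sum - T) q1' 0
            (by intro j hj; simpa using hH j hj)]
          simp [hK2def]
        have hsplit2 : (q1'.take K2).sum + (q1'.drop K2).sum = q1'.sum := by
          rw [← List.sum_append, List.take_append_drop]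
        have hs1'' : q1'.sum - ((buildPref (c ++ c)).getD (left % c.length + K2) 0
            - (buildPref (c ++ c)).getD (left % c.length) 0) = (q1'.drop K2).sum := by
          rw [hH K2 hK2le]
          omega
        -- rotation invariant for the next iteration
        have hrot'' : q1'.drop K2 ++ (q2.drop K1 ++ q1'.take K2) = c.rotate (left + K2) := by
          rw [← List.rotate_rotate, ← hrot',
            List.rotate_eq_drop_append_take (by simp; omega : K2 ≤ (q1' ++ q2.drop K1).length),
            List.drop_append_of_le_length hK2le, List.take_append_of_le_length hK2le,
            List.append_assoc]
        -- one step on each side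
        have hbudI : ¬ (a : Int) ≥ (c.length : Int) := by exact_mod_cast hbud
        have hcast : (a : Int) + (K1 : Int) + (K2 : Int) = ((a + K1 + K2 : Nat) : Int) := by
          push_cast; ring
        have hstepA : pyOuter (c.length : Int) (fuel + 1) (q1, q2, q1.sum, q2.sum, (a : Int))
            = pyOuter (c.length : Int) fuel
                (q1'.drop K2, q2.drop K1 ++ q1'.take K2,
                 (q1'.drop K2).sum, (q2.drop K1 ++ q1'.take K2).sum,
                 ((a + K1 + K2 : Nat) : Int)) := by
          conv_lhs => rw [pyOuter]
          rw [if_pos hne, if_neg hbudI]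
          simp only [hA1, hA2, ← hcast]
        have hstepB : bOuter (buildPref (c ++ c)) c.length T (fuel + 1) left
              (left + q1.length) a q1.sum
            = bOuter (buildPref (c ++ c)) c.length T fuel (left + K2)
                (left + q1.length + K1) (a + K1 + K2) ((q1'.drop K2).sum) := by
          conv_lhs => rw [bOuter]
          rw [if_neg heqT, if_neg hbud]
          simp only [hk1, hs1', hk2, hs1'']
        rw [hstepA, hstepB]
        have hlen'' : left + q1.length + K1 = left + K2 + (q1'.drop K2).length := by
          simp [hq1'len]
          omega
        rw [hlen'']
        exact ih (q1'.drop K2) (q2.drop K1 ++ q1'.take K2) (a + K1 + K2) (left + K2) hrot''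

-- ===== VERDICT (by name: the statement is the Claim_ definition above) =====
theorem solution_spec : Claim_equal_solution := by
  unfold Claim_equal_solution
  intro queue1 queue2 _
  unfold Spec_solution
  simp only [solution, solution_alt]
  by_cases hm : PySem.Int.mod (queue1.sum + queue2.sum) 2 = 1
  · rw [if_pos hm, if_pos hm]
  · rw [if_neg hm, if_neg hm]
    have hmod : PySem.Int.mod (queue1.sum + queue2.sum) 2 = (queue1.sum + queue2.sum) % 2 :=
      PySem.Int.mod_eq_emod_of_pos (by omega)
    have hdiv : PySem.Int.floordiv (queue1.sum + queue2.sum) 2 = (queue1.sum + queue2.sum) / 2 :=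
      PySem.Int.floordiv_eq_ediv_of_pos (by omega)
    have hparity : (queue1.sum + queue2.sum) % 2 = 0 := by
      rw [hmod] at hm
      rcases Int.emod_two_eq (queue1.sum + queue2.sum) with h | h
      · exact h
      · exact absurd h hm
    have hT : (queue1 ++ queue2).sum
        = 2 * PySem.Int.floordiv (queue1.sum + queue2.sum) 2 := by
      rw [hdiv]
      have := Int.mul_ediv_add_emod (queue1.sum + queue2.sum) 2
      simp only [List.sum_append]
      omega
    have h := outer_sim (queue1 ++ queue2) (PySem.Int.floordiv (queue1.sum + queue2.sum) 2)
      hT (queue1.length + queue2.length + 2) queue1 queue2 0 0 (by rw [List.rotate_zero])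
    simp only [List.length_append, Nat.zero_add, Nat.cast_zero] at h
    have hlim : (queue1.length : Int) + (queue2.length : Int)
        = ((queue1.length + queue2.length : Nat) : Int) := by push_cast; ring
    have hpref : (queue1 ++ queue2) ++ (queue1 ++ queue2)
        = queue1 ++ queue2 ++ queue1 ++ queue2 := by
      simp [List.append_assoc]
    rw [hlim]
    rw [hpref] at h
    exact h
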